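-- pv_equiv track=rewrite | github.com/kewh5868/SAXShell | src/saxshell/cluster/xyz_cluster_extractor.py | _build_stoich_label
-- ===== SOURCE A (Python) =====
-- from typing import Dict, List, Optional, Set, Tuple
--
-- def _build_stoich_label(stoich_counts: Dict[str, int]) -> str:
--     """Turn a dict like {"Pb": 2, "I": 4} into 'Pb2I4', with Pb–I
--     preference."""
--     counts = {k: v for k, v in stoich_counts.items() if v > 0}
--     if not counts:
--         return "None"
--
--     pieces: List[str] = []
--
--     # Pb–I preference if present
--     if "Pb" in counts:
--         n = counts.pop("Pb")
--         pieces.append("Pb" if n == 1 else f"Pb{n}")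
--     if "I" in counts:
--         n = counts.pop("I")
--         pieces.append("I" if n == 1 else f"I{n}")
--
--     for elem in sorted(counts.keys()):
--         n = counts[elem]
--         pieces.append(elem if n == 1 else f"{elem}{n}")
--
--     return "".join(pieces)
-- ===== SOURCE B (Python) =====
-- def _build_stoich_label(stoich_counts):
--     """Turn a dict like {"Pb": 2, "I": 4} into 'Pb2I4', with Pb-I preference.
--
--     Single pass: each positive entry is formatted immediately and placed by
--     binary-search insertion into a list kept sorted by a priority key
--     (Pb first, then I, then alphabetical) -- no library sort, no dict surgery."""
--     ordered = []  # list of (priority_key, formatted_piece), kept sorted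
--     for elem, n in stoich_counts.items():
--         if n <= 0:
--             continue
--         key = "0" if elem == "Pb" else "1" if elem == "I" else "2" + elem
--         piece = elem if n == 1 else f"{elem}{n}"
--         lo, hi = 0, len(ordered)
--         while lo < hi:
--             mid = (lo + hi) // 2
--             if ordered[mid][0] < key:
--                 lo = mid + 1
--             else:
--                 hi = mid
--         ordered.insert(lo, (key, piece))
--     return "".join(p for _, p in ordered) if ordered else "None"
-- ===== Notes on version B (the rewrite author's own statement) =====
-- stated objective: alternative
-- what changed: Replaces A's three-phase construction (filter into a new dict, explicit Pb/I pop branches, then a loop over the sorted remaining keys) by a single pass that formats each positive entry immediately and places it by binary-search insertion into an accumulator list kept sorted by a Pb<I<alphabetical priority key; no library sort and no dict mutation.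
import Mathlib
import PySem

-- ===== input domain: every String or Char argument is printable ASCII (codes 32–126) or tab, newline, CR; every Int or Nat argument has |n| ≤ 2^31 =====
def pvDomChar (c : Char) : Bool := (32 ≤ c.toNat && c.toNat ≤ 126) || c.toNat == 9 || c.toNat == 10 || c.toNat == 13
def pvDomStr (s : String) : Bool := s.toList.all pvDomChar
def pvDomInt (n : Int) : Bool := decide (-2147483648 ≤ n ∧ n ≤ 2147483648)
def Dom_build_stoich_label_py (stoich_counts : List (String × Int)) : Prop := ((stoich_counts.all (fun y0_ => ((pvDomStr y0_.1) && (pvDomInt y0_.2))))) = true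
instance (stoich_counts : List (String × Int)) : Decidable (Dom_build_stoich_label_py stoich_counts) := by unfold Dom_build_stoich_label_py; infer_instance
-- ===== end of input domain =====

-- B replaces A's three-phase build (filter into a dict, Pb/I pop branches, loop over sorted remaining keys)
-- by a single pass that formats each positive entry immediately and places it by ordered insertion
-- (insertion sort) into an accumulator list; no library sort, no dict mutation; alternative, not faster.


-- ===== PORT A =====
-- `counts = {k: v for k, v in stoich_counts.items() if v > 0}`: the incoming dict is the
-- association list materialised as a Python dict (PySem.Dict.ofList), the comprehension a
-- filter of its items.  `counts.pop(c)` is Dict.pop? (guarded by `contains`, so the `none`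
-- branch is unreachable); `counts[elem]` in the loop is Dict.getD (elem is always a key).
def build_stoich_label_py (stoich_counts : List (String × Int)) : String :=
  let counts : PySem.Dict String Int :=
    PySem.Dict.mk (((PySem.Dict.ofList stoich_counts).items).filter (fun p => decide (0 < p.2)))
  if counts.items = [] then "None"
  else
    let pieces : List String := []
    let s1 : List String × PySem.Dict String Int :=
      if counts.contains "Pb" then
        match counts.pop? "Pb" with
        | some (n, c) => (pieces ++ [if n = 1 then "Pb" else "Pb" ++ PySem.Int.toStr n], c)
        | none => (pieces, counts)
      else (pieces, counts)
    let s2 : List String × PySem.Dict String Int :=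
      if s1.2.contains "I" then
        match s1.2.pop? "I" with
        | some (n, c) => (s1.1 ++ [if n = 1 then "I" else "I" ++ PySem.Int.toStr n], c)
        | none => s1
      else s1
    let pieces2 : List String :=
      (PySem.List.sorted s2.2.keys (fun k => k)).foldl
        (fun acc elem =>
          let n := s2.2.getD elem 0
          acc ++ [if n = 1 then elem else elem ++ PySem.Int.toStr n]) s2.1
    PySem.Str.join "" pieces2

-- ===== PORT B =====
-- `key = "0" if elem == "Pb" else "1" if elem == "I" else "2" + elem`
def pvKeyB (k : String) : String := if k = "Pb" then "0" else if k = "I" then "1" else "2" ++ k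

-- the `while lo < hi: mid = (lo+hi)//2; ...` binary search for the insertion point
-- (ordered[mid] is always in range; the `none` arm is unreachable)
def pvFindIdx (ordered : List (String × String)) (key : String) (lo hi : Nat) : Nat :=
  if _h : lo < hi then
    -- mid = (lo + hi) // 2, written inline
    match ordered[(lo + hi) / 2]? with
    | some x =>
        if x.1 < key then pvFindIdx ordered key ((lo + hi) / 2 + 1) hi
        else pvFindIdx ordered key lo ((lo + hi) / 2)
    | none => lo
  else lo
termination_by hi - lo
decreasing_by all_goals omega

def build_stoich_label_py_alt (stoich_counts : List (String × Int)) : String :=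
  let ordered : List (String × String) :=
    ((PySem.Dict.ofList stoich_counts).items).foldl
      (fun acc p =>
        if p.2 ≤ 0 then acc   -- `if n <= 0: continue`
        else
          let key := pvKeyB p.1
          let piece := if p.2 = 1 then p.1 else p.1 ++ PySem.Int.toStr p.2
          let lo := pvFindIdx acc key 0 acc.length
          PySem.List.insert acc (lo : Int) (key, piece))
      []
  if ordered = [] then "None" else PySem.Str.join "" (ordered.map Prod.snd)

-- ===== PRECONDITION & SPEC =====
def Spec_build_stoich_label_py (stoich_counts : List (String × Int)) (out : String) : Prop := out = build_stoich_label_py_alt stoich_counts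
instance (stoich_counts : List (String × Int)) (out : String) : Decidable (Spec_build_stoich_label_py stoich_counts out) := by unfold Spec_build_stoich_label_py; infer_instance

-- ===== CLAIM (what is proved, stated in full; the proofs are below) =====
def Claim_equal_build_stoich_label_py : Prop := ∀ (stoich_counts : List (String × Int)), Dom_build_stoich_label_py stoich_counts → Spec_build_stoich_label_py stoich_counts (build_stoich_label_py stoich_counts)

-- ===== LEMMAS AND PROOFS =====

-- the formatted pair B builds for one positive entry
def pvG (p : String × Int) : String × String :=
  (pvKeyB p.1, if p.2 = 1 then p.1 else p.1 ++ PySem.Int.toStr p.2)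

-- B's loop body as written in the port (binary-search insertion)
def pvBody (acc : List (String × String)) (p : String × Int) : List (String × String) :=
  if p.2 ≤ 0 then acc
  else PySem.List.insert acc ((pvFindIdx acc (pvG p).1 0 acc.length : Nat) : Int) (pvG p)

-- proof-side reference: ordered insertion by a linear scan
def pvInsertB : List (String × String) → (String × String) → List (String × String)
  | [], kp => [kp]
  | x :: t, kp => if x.1 < kp.1 then x :: pvInsertB t kp else kp :: x :: t

def pvBodyL (acc : List (String × String)) (p : String × Int) : List (String × String) :=
  if p.2 ≤ 0 then acc else pvInsertB acc (pvG p)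

lemma pv_filter_key_char (L : List (String × Int)) (hnd : (L.map Prod.fst).Nodup) (c : String) :
    L.filter (fun p => p.1 == c) = [] ∨ ∃ v, L.filter (fun p => p.1 == c) = [(c, v)] := by
  induction L with
  | nil => left; rfl
  | cons h t ih =>
    simp only [List.map_cons, List.nodup_cons] at hnd
    by_cases hc : h.1 = c
    · have ht : t.filter (fun p => p.1 == c) = [] := by
        rcases ih hnd.2 with h0 | ⟨v, hv⟩
        · exact h0
        · exfalso
          have hm : (c, v) ∈ t.filter (fun p => p.1 == c) := hv ▸ List.mem_singleton_self _
          have : c ∈ t.map Prod.fst := List.mem_map.mpr ⟨(c, v), (List.mem_filter.mp hm).1, rfl⟩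
          exact hnd.1 (hc ▸ this)
      right
      refine ⟨h.2, ?_⟩
      rw [List.filter_cons]
      simp only [hc, beq_self_eq_true, if_pos, ht]
      rw [← hc]
    · rw [List.filter_cons]
      simp only [show (h.1 == c) = false from beq_eq_false_iff_ne.mpr hc, if_neg, Bool.false_eq_true, not_false_iff]
      exact ih hnd.2

lemma pv_lt_0_2 (k : String) : ("0" : String) < "2" ++ k := by
  rw [String.lt_iff_toList_lt]
  simp only [String.toList_append]
  show ['0'] < '2' :: k.toList
  rw [List.cons_lt_cons_iff]
  left; decide

lemma pv_lt_1_2 (k : String) : ("1" : String) < "2" ++ k := by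
  rw [String.lt_iff_toList_lt]
  simp only [String.toList_append]
  show ['1'] < '2' :: k.toList
  rw [List.cons_lt_cons_iff]
  left; decide

lemma pv_lt_2_2 {a b : String} (h : a < b) : ("2" ++ a : String) < "2" ++ b := by
  rw [String.lt_iff_toList_lt] at h ⊢
  simp only [String.toList_append]
  show '2' :: a.toList < '2' :: b.toList
  rw [List.cons_lt_cons_iff]
  right; exact ⟨rfl, h⟩

lemma pv_lt_0_1 : ("0" : String) < "1" := by rw [String.lt_iff_toList_lt]; decide

lemma pv_pairwise_lt_of_nodup {l : List (String × Int)}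
    (hle : l.Pairwise (fun a b => a.1 ≤ b.1)) (hnd : (l.map Prod.fst).Nodup) :
    l.Pairwise (fun a b => a.1 < b.1) := by
  rw [List.nodup_iff_pairwise_ne, List.pairwise_map] at hnd
  exact (hle.and hnd).imp (fun h => lt_of_le_of_ne h.1 h.2)

lemma pv_keyB_other {k : String} (h1 : k ≠ "Pb") (h2 : k ≠ "I") : pvKeyB k = "2" ++ k := by
  simp [pvKeyB, h1, h2]

lemma pv_keyB_inj : Function.Injective pvKeyB := by
  intro a b h
  by_cases ha1 : a = "Pb" <;> by_cases hb1 : b = "Pb" <;>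
    by_cases ha2 : a = "I" <;> by_cases hb2 : b = "I" <;>
      simp_all [pvKeyB]
  all_goals (exfalso; have h2 := congrArg String.toList h; simp [String.toList_append] at h2)

lemma pv_sorted_keys (r : List (String × Int)) (hnd : (r.map Prod.fst).Nodup) :
    PySem.List.sorted (r.map Prod.fst) (fun k => k) =
      (PySem.List.sorted r (fun p => p.1)).map Prod.fst := by
  apply PySem.List.sorted_eq_of_perm_of_pairwise_lt
  · exact (PySem.List.sorted_perm r (fun p => p.1) false).map Prod.fst
  · rw [List.pairwise_map]
    apply pv_pairwise_lt_of_nodup (PySem.List.sorted_pairwise r (fun p => p.1))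
    rw [List.Perm.nodup_iff ((PySem.List.sorted_perm r (fun p => p.1) false).map Prod.fst)]
    exact hnd

lemma pv_subsingleton_pairwise {α : Type} {R : α → α → Prop} {l : List α}
    (h : l = [] ∨ ∃ x, l = [x]) : l.Pairwise R := by
  rcases h with h | ⟨x, h⟩ <;> subst h <;> simp

lemma pv_sorted_decomp (L : List (String × Int)) (hnd : (L.map Prod.fst).Nodup) :
    PySem.List.sorted L (fun kv => pvKeyB kv.1) =
      L.filter (fun p => p.1 == "Pb") ++ L.filter (fun p => p.1 == "I") ++
        PySem.List.sorted (L.filter (fun p => !(p.1 == "Pb") && !(p.1 == "I"))) (fun p => p.1) := by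
  set pb := L.filter (fun p => p.1 == "Pb") with hpbdef
  set iF := L.filter (fun p => p.1 == "I") with hifdef
  set rest := L.filter (fun p => !(p.1 == "Pb") && !(p.1 == "I")) with hrestdef
  have hsub : rest.Sublist L := List.filter_sublist
  have hrest_nd : (rest.map Prod.fst).Nodup := ((hsub.map Prod.fst).nodup hnd)
  apply PySem.List.sorted_eq_of_perm_of_pairwise_lt
  · -- permutation
    have h1 : (iF ++ rest).Perm (L.filter (fun p => !(p.1 == "Pb"))) := by
      have hi : iF = (L.filter (fun p => !(p.1 == "Pb"))).filter (fun p => p.1 == "I") := by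
        rw [List.filter_filter]
        apply List.filter_congr
        intro a _
        by_cases h : a.1 = "I" <;> simp [h]
      have hr : rest = (L.filter (fun p => !(p.1 == "Pb"))).filter (fun p => !(p.1 == "I")) := by
        rw [List.filter_filter]
        apply List.filter_congr
        intro a _
        exact Bool.and_comm _ _
      rw [hi, hr]
      exact List.filter_append_perm _ _
    have h2 : (iF ++ PySem.List.sorted rest (fun p => p.1)).Perm (L.filter (fun p => !(p.1 == "Pb"))) :=
      ((PySem.List.sorted_perm rest _ false).append_left iF).trans h1
    have h3 : (pb ++ (iF ++ PySem.List.sorted rest (fun p => p.1))).Perm L :=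
      (h2.append_left pb).trans (List.filter_append_perm _ _)
    rw [List.append_assoc]
    exact h3
  · -- strict pairwise under the key
    have hmem_pb : ∀ a ∈ pb, a.1 = "Pb" := fun a ha => by
      have := (List.mem_filter.mp ha).2; simpa using this
    have hmem_if : ∀ a ∈ iF, a.1 = "I" := fun a ha => by
      have := (List.mem_filter.mp ha).2; simpa using this
    have hmem_sr : ∀ a ∈ PySem.List.sorted rest (fun p => p.1), a.1 ≠ "Pb" ∧ a.1 ≠ "I" := by
      intro a ha
      have hm := (List.mem_filter.mp ((PySem.List.sorted_perm rest _ false).mem_iff.mp ha)).2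
      constructor
      · intro h; rw [h] at hm; simp at hm
      · intro h; rw [h] at hm; simp at hm
    have hpb_char := pv_filter_key_char L hnd "Pb"
    have hif_char := pv_filter_key_char L hnd "I"
    have hsr_lt : (PySem.List.sorted rest (fun p => p.1)).Pairwise
        (fun a b => pvKeyB a.1 < pvKeyB b.1) := by
      have hle := PySem.List.sorted_pairwise rest (fun p => p.1)
      have hnd' : ((PySem.List.sorted rest (fun p => p.1)).map Prod.fst).Nodup := by
        rw [List.Perm.nodup_iff ((PySem.List.sorted_perm rest (fun p => p.1) false).map Prod.fst)]
        exact hrest_nd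
      have hlt := pv_pairwise_lt_of_nodup hle hnd'
      refine hlt.imp_of_mem ?_
      intro a b ha hb hab
      obtain ⟨ha1, ha2⟩ := hmem_sr a ha
      obtain ⟨hb1, hb2⟩ := hmem_sr b hb
      rw [pv_keyB_other ha1 ha2, pv_keyB_other hb1 hb2]
      exact pv_lt_2_2 hab
    rw [List.pairwise_append]
    refine ⟨?_, hsr_lt, ?_⟩
    · rw [List.pairwise_append]
      refine ⟨pv_subsingleton_pairwise ?_, pv_subsingleton_pairwise ?_, ?_⟩
      · rcases hpb_char with h | ⟨v, h⟩
        · exact Or.inl h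
        · exact Or.inr ⟨_, h⟩
      · rcases hif_char with h | ⟨v, h⟩
        · exact Or.inl h
        · exact Or.inr ⟨_, h⟩
      · intro a ha b hb
        rw [hmem_pb a ha, hmem_if b hb]
        exact pv_lt_0_1
    · intro a ha b hb
      rcases List.mem_append.mp ha with ha' | ha'
      · rw [hmem_pb a ha']
        obtain ⟨hb1, hb2⟩ := hmem_sr b hb
        rw [pv_keyB_other hb1 hb2]
        exact pv_lt_0_2 _
      · rw [hmem_if a ha']
        obtain ⟨hb1, hb2⟩ := hmem_sr b hb
        rw [pv_keyB_other hb1 hb2]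
        exact pv_lt_1_2 _

lemma pv_loop (rest : List (String × Int)) (hnd : (rest.map Prod.fst).Nodup) (init : List String) :
    (PySem.List.sorted (({ items := rest } : PySem.Dict String Int).keys) (fun k => k)).foldl
        (fun acc elem =>
          acc ++ [if ({ items := rest } : PySem.Dict String Int).getD elem 0 = 1 then elem
                  else elem ++ PySem.Int.toStr (({ items := rest } : PySem.Dict String Int).getD elem 0)]) init
      = init ++ (PySem.List.sorted rest (fun p => p.1)).map
          (fun p => if p.2 = 1 then p.1 else p.1 ++ PySem.Int.toStr p.2) := by
  have hk : ({ items := rest } : PySem.Dict String Int).keys = rest.map Prod.fst := rfl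
  rw [hk, pv_sorted_keys rest hnd,
    PySem.List.foldl_append_singleton_eq_map
      (fun elem => if ({ items := rest } : PySem.Dict String Int).getD elem 0 = 1 then elem
                   else elem ++ PySem.Int.toStr (({ items := rest } : PySem.Dict String Int).getD elem 0)),
    List.map_map]
  congr 1
  apply List.map_congr_left
  intro p hp
  have hmem : p ∈ rest := (PySem.List.sorted_perm rest (fun p => p.1) false).mem_iff.mp hp
  have hget : ({ items := rest } : PySem.Dict String Int).getD p.1 0 = p.2 :=
    PySem.Dict.getD_of_mem_items _ (by exact hmem) hnd 0
  simp only [Function.comp, hget]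

lemma pv_contains_true {L : List (String × Int)} {c : String} {v : Int}
    (h : L.filter (fun p => p.1 == c) = [(c, v)]) :
    ({ items := L } : PySem.Dict String Int).contains c = true := by
  simp only [PySem.Dict.contains]
  have hm : (c, v) ∈ L.filter (fun p => p.1 == c) := h ▸ List.mem_singleton_self _
  have := List.mem_filter.mp hm
  rw [List.any_eq_true]
  exact ⟨(c, v), this.1, this.2⟩

lemma pv_contains_false {L : List (String × Int)} {c : String}
    (h : L.filter (fun p => p.1 == c) = []) :
    ({ items := L } : PySem.Dict String Int).contains c = false := by
  simp only [PySem.Dict.contains]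
  rw [List.any_eq_false]
  intro p hp hc
  have : p ∈ L.filter (fun p => p.1 == c) := List.mem_filter.mpr ⟨hp, hc⟩
  simp [h] at this

lemma pv_mem_of_filter_singleton {L : List (String × Int)} {c : String} {v : Int}
    (h : L.filter (fun p => p.1 == c) = [(c, v)]) : (c, v) ∈ L :=
  (List.mem_filter.mp (h ▸ List.mem_singleton_self _)).1

lemma pv_pop_eq {L : List (String × Int)} {c : String} {v : Int}
    (hnd : (L.map Prod.fst).Nodup) (h : L.filter (fun p => p.1 == c) = [(c, v)]) :
    ({ items := L } : PySem.Dict String Int).pop? c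
      = some (v, { items := L.filter (fun p => !(p.1 == c)) }) := by
  simp only [PySem.Dict.pop?, PySem.Dict.erase]
  rw [PySem.Dict.get?_of_mem_items _ (pv_mem_of_filter_singleton h) hnd]
  rfl

lemma pv_filter_not_eq_self {L : List (String × Int)} {c : String}
    (h : L.filter (fun p => p.1 == c) = []) :
    L.filter (fun p => !(p.1 == c)) = L := by
  rw [List.filter_eq_nil_iff] at h
  rw [List.filter_eq_self]
  intro a ha
  simpa using h a ha

lemma pv_and_drop_right {L : List (String × Int)} {c : String} (q : (String × Int) → Bool)
    (h : L.filter (fun p => p.1 == c) = []) :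
    L.filter (fun p => q p && !(p.1 == c)) = L.filter q := by
  rw [List.filter_eq_nil_iff] at h
  apply List.filter_congr
  intro a ha
  have := h a ha
  simp at this
  simp [this]

lemma pv_and_drop_left {L : List (String × Int)} {c : String} (q : (String × Int) → Bool)
    (h : L.filter (fun p => p.1 == c) = []) :
    L.filter (fun p => !(p.1 == c) && q p) = L.filter q := by
  rw [List.filter_eq_nil_iff] at h
  apply List.filter_congr
  intro a ha
  have := h a ha
  simp at this
  simp [this]

lemma pv_filter_I_after_Pb (L : List (String × Int)) :
    (L.filter (fun p => !(p.1 == "Pb"))).filter (fun p => p.1 == "I")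
      = L.filter (fun p => p.1 == "I") := by
  rw [List.filter_filter]
  apply List.filter_congr
  intro a _
  by_cases h : a.1 = "I" <;> simp [h]

lemma pv_filter_rest (L : List (String × Int)) :
    (L.filter (fun p => !(p.1 == "Pb"))).filter (fun p => !(p.1 == "I"))
      = L.filter (fun p => !(p.1 == "Pb") && !(p.1 == "I")) := by
  rw [List.filter_filter]
  apply List.filter_congr
  intro a _
  exact Bool.and_comm _ _

-- A's port reduces to "None"-or-join over the positive items sorted by the priority key
lemma pv_A_eq (sc : List (String × Int)) :
    build_stoich_label_py sc =
      (let L := ((PySem.Dict.ofList sc).items).filter (fun p => decide (0 < p.2))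
       if L = [] then "None"
       else PySem.Str.join ""
         ((PySem.List.sorted L (fun kv => pvKeyB kv.1)).map
           (fun kv => if kv.2 = 1 then kv.1 else kv.1 ++ PySem.Int.toStr kv.2))) := by
  simp only [build_stoich_label_py]
  set L := ((PySem.Dict.ofList sc).items).filter (fun p => decide (0 < p.2)) with hLdef
  have hnd : (L.map Prod.fst).Nodup := by
    have h0 : ((PySem.Dict.ofList sc).items.map Prod.fst).Nodup := PySem.Dict.nodup_keys_ofList sc
    exact (List.Sublist.map Prod.fst (List.filter_sublist)).nodup h0
  by_cases hL : L = []
  · rw [if_pos hL, if_pos hL]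
  rw [if_neg hL, if_neg hL]
  rcases pv_filter_key_char L hnd "Pb" with hpb | ⟨pv, hpb⟩ <;>
    rcases pv_filter_key_char L hnd "I" with hif | ⟨iv, hif⟩
  · -- no Pb, no I
    rw [pv_sorted_decomp L hnd, hpb, hif,
      pv_and_drop_right _ hif, pv_filter_not_eq_self hpb]
    simp only [pv_contains_false hpb, pv_contains_false hif, Bool.false_eq_true, if_false]
    rw [pv_loop L hnd []]
    simp
  · -- no Pb, I present
    have hndI : ((L.filter (fun p => !(p.1 == "I"))).map Prod.fst).Nodup :=
      (List.Sublist.map Prod.fst (List.filter_sublist)).nodup hnd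
    rw [pv_sorted_decomp L hnd, hpb, hif, pv_and_drop_left _ hpb]
    simp only [pv_contains_false hpb, Bool.false_eq_true, if_false,
      pv_contains_true hif, pv_pop_eq hnd hif, if_true]
    rw [pv_loop (L.filter (fun p => !(p.1 == "I"))) hndI]
    simp
  · -- Pb present, no I
    have hndPb : ((L.filter (fun p => !(p.1 == "Pb"))).map Prod.fst).Nodup :=
      (List.Sublist.map Prod.fst (List.filter_sublist)).nodup hnd
    have hifL1 : (L.filter (fun p => !(p.1 == "Pb"))).filter (fun p => p.1 == "I") = [] := by
      rw [pv_filter_I_after_Pb, hif]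
    rw [pv_sorted_decomp L hnd, hpb, hif, pv_and_drop_right _ hif]
    simp only [pv_contains_true hpb, pv_pop_eq hnd hpb, if_true,
      pv_contains_false hifL1, Bool.false_eq_true, if_false]
    rw [pv_loop (L.filter (fun p => !(p.1 == "Pb"))) hndPb]
    simp
  · -- Pb and I present
    have hndPb : ((L.filter (fun p => !(p.1 == "Pb"))).map Prod.fst).Nodup :=
      (List.Sublist.map Prod.fst (List.filter_sublist)).nodup hnd
    have hifL1 : (L.filter (fun p => !(p.1 == "Pb"))).filter (fun p => p.1 == "I") = [("I", iv)] := by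
      rw [pv_filter_I_after_Pb, hif]
    have hndR : ((L.filter (fun p => !(p.1 == "Pb") && !(p.1 == "I"))).map Prod.fst).Nodup :=
      (List.Sublist.map Prod.fst (List.filter_sublist)).nodup hnd
    rw [pv_sorted_decomp L hnd, hpb, hif]
    simp only [pv_contains_true hpb, pv_pop_eq hnd hpb, if_true,
      pv_contains_true hifL1, pv_pop_eq hndPb hifL1]
    rw [pv_filter_rest, pv_loop (L.filter (fun p => !(p.1 == "Pb") && !(p.1 == "I"))) hndR]
    simp

-- ===== B-side lemmas: the insertion fold builds the key-sorted formatted list =====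

lemma pv_ins_perm (l : List (String × String)) (kp : String × String) :
    (pvInsertB l kp).Perm (kp :: l) := by
  induction l with
  | nil => simp [pvInsertB]
  | cons x t ih =>
    simp only [pvInsertB]
    split_ifs with h
    · exact (ih.cons x).trans (List.Perm.swap kp x t)
    · exact List.Perm.refl _

lemma pv_ins_mem {l : List (String × String)} {kp y : String × String}
    (h : y ∈ pvInsertB l kp) : y = kp ∨ y ∈ l := by
  have := (pv_ins_perm l kp).mem_iff.mp h
  simpa using this

lemma pv_ins_pairwise {l : List (String × String)} {kp : String × String}
    (hs : l.Pairwise (fun a b => a.1 < b.1)) (hne : ∀ x ∈ l, x.1 ≠ kp.1) :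
    (pvInsertB l kp).Pairwise (fun a b => a.1 < b.1) := by
  induction l with
  | nil => simp [pvInsertB]
  | cons x t ih =>
    rw [List.pairwise_cons] at hs
    simp only [pvInsertB]
    split_ifs with h
    · rw [List.pairwise_cons]
      constructor
      · intro y hy
        rcases pv_ins_mem hy with rfl | hy'
        · exact h
        · exact hs.1 y hy'
      · exact ih hs.2 (fun z hz => hne z (List.mem_cons_of_mem x hz))
    · have hxk : kp.1 < x.1 :=
        lt_of_le_of_ne (le_of_not_gt h) (Ne.symm (hne x (List.mem_cons_self)))
      rw [List.pairwise_cons]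
      constructor
      · intro y hy
        rcases List.mem_cons.mp hy with rfl | hy'
        · exact hxk
        · exact lt_trans hxk (hs.1 y hy')
      · rw [List.pairwise_cons]; exact hs
  
lemma pv_ins_append_perm (acc : List (String × String)) (x : String × String)
    (R : List (String × String)) :
    (pvInsertB acc x ++ R).Perm (acc ++ x :: R) :=
  ((pv_ins_perm acc x).append_right R).trans (List.perm_middle.symm)

lemma pv_fold_perm (M : List (String × Int)) :
    ∀ acc : List (String × String),
      (M.foldl pvBodyL acc).Perm (acc ++ (M.filter (fun p => !decide (p.2 ≤ 0))).map pvG) := by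
  induction M with
  | nil => intro acc; simp
  | cons h t ih =>
    intro acc
    simp only [List.foldl_cons, List.filter_cons, pvBodyL]
    by_cases hp : h.2 ≤ 0
    · simp only [hp, if_pos, decide_true, Bool.not_true, Bool.false_eq_true, if_neg,
        not_false_iff]
      exact ih acc
    · simp only [hp, if_neg, not_false_iff, decide_false, Bool.not_false, if_pos, List.map_cons]
      exact (ih (pvInsertB acc (pvG h))).trans (pv_ins_append_perm acc (pvG h) _)

lemma pv_fold_pairwise (M : List (String × Int)) :
    ∀ acc : List (String × String),
      acc.Pairwise (fun a b => a.1 < b.1) →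
      ((acc ++ (M.filter (fun p => !decide (p.2 ≤ 0))).map pvG).map Prod.fst).Nodup →
      (M.foldl pvBodyL acc).Pairwise (fun a b => a.1 < b.1) := by
  induction M with
  | nil => intro acc hs _; simpa using hs
  | cons h t ih =>
    intro acc hs hnd
    simp only [List.foldl_cons, List.filter_cons, pvBodyL] at *
    by_cases hp : h.2 ≤ 0
    · simp only [hp, if_pos, decide_true, Bool.not_true, Bool.false_eq_true, if_neg,
        not_false_iff] at hnd ⊢
      exact ih acc hs hnd
    · simp only [hp, if_neg, not_false_iff, decide_false, Bool.not_false, if_pos,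
        List.map_cons] at hnd ⊢
      have hnd' : ((acc.map Prod.fst) ++ (pvG h).1 ::
          ((t.filter (fun p => !decide (p.2 ≤ 0))).map pvG).map Prod.fst).Nodup := by
        simpa using hnd
      have hdisj := (List.nodup_append.mp hnd').2.2
      have hke : (pvG h).1 ∉ acc.map Prod.fst := by
        intro hmem
        exact (hdisj _ hmem _ List.mem_cons_self) rfl
      have hne : ∀ x ∈ acc, x.1 ≠ (pvG h).1 := by
        intro x hx heq
        exact hke (heq ▸ List.mem_map.mpr ⟨x, hx, rfl⟩)
      apply ih (pvInsertB acc (pvG h)) (pv_ins_pairwise hs hne)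
      have hpermfst := (pv_ins_append_perm acc (pvG h)
        ((t.filter (fun p => !decide (p.2 ≤ 0))).map pvG)).map Prod.fst
      exact hpermfst.nodup_iff.mpr (by simpa using hnd)

lemma pv_bisect_spec (l : List (String × String)) (key : String)
    (hs : l.Pairwise (fun a b => a.1 < b.1)) :
    ∀ n lo hi, hi - lo ≤ n → lo ≤ hi → hi ≤ l.length →
      (∀ i (h : i < l.length), i < lo → (l[i]).1 < key) →
      (∀ i (h : i < l.length), hi ≤ i → ¬ (l[i]).1 < key) →
      pvFindIdx l key lo hi ≤ l.length ∧
        ∀ i (h : i < l.length), ((l[i]).1 < key ↔ i < pvFindIdx l key lo hi) := by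
  have hpw := List.pairwise_iff_getElem.mp hs
  intro n
  induction n with
  | zero =>
    intro lo hi hle hlh hhl hbelow habove
    have hlo : ¬ lo < hi := by omega
    rw [pvFindIdx, dif_neg hlo]
    refine ⟨by omega, ?_⟩
    intro i h
    constructor
    · intro hlt
      by_contra hge
      exact habove i h (by omega) hlt
    · intro hi'
      exact hbelow i h hi'
  | succ n ih =>
    intro lo hi hle hlh hhl hbelow habove
    by_cases hlo : lo < hi
    · rw [pvFindIdx, dif_pos hlo]
      have hmid : (lo + hi) / 2 < l.length := by omega
      rw [List.getElem?_eq_getElem hmid]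
      simp only
      by_cases hx : (l[(lo + hi) / 2]).1 < key
      · rw [if_pos hx]
        apply ih ((lo + hi) / 2 + 1) hi (by omega) (by omega) hhl
        · intro i h hi'
          rcases Nat.lt_or_ge i ((lo + hi) / 2) with h' | h'
          · exact lt_trans (hpw i ((lo + hi) / 2) h hmid h') hx
          · have : i = (lo + hi) / 2 := by omega
            subst this; exact hx
        · exact habove
      · rw [if_neg hx]
        apply ih lo ((lo + hi) / 2) (by omega) (by omega) (by omega) hbelow
        intro i h hi' hlt
        rcases Nat.lt_or_ge ((lo + hi) / 2) i with h' | h'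
        · exact hx (lt_trans (hpw ((lo + hi) / 2) i hmid h h') hlt)
        · have : i = (lo + hi) / 2 := by omega
          subst this; exact hx hlt
    · rw [pvFindIdx, dif_neg hlo]
      refine ⟨by omega, ?_⟩
      intro i h
      constructor
      · intro hlt
        by_contra hge
        exact habove i h (by omega) hlt
      · intro hi'
        exact hbelow i h hi'

lemma pv_take_drop_insert (kp : String × String) :
    ∀ (l : List (String × String)) (r : Nat), r ≤ l.length →
      (∀ i (h : i < l.length), ((l[i]).1 < kp.1 ↔ i < r)) →
      l.take r ++ kp :: l.drop r = pvInsertB l kp := by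
  intro l
  induction l with
  | nil =>
    intro r hr _
    have : r = 0 := by simpa using hr
    subst this
    simp [pvInsertB]
  | cons x t ih =>
    intro r hr hiff
    cases r with
    | zero =>
      have h0 : ¬ x.1 < kp.1 := by
        intro hlt
        exact absurd ((hiff 0 (by simp)).mp hlt) (by omega)
      simp [pvInsertB, h0]
    | succ s =>
      have h0 : x.1 < kp.1 := (hiff 0 (by simp)).mpr (by omega)
      simp only [List.take_succ_cons, List.drop_succ_cons, List.cons_append, pvInsertB,
        if_pos h0]
      congr 1
      apply ih s (by simpa using hr)
      intro i h
      have := hiff (i + 1) (by simpa using Nat.succ_lt_succ h)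
      simpa [Nat.succ_lt_succ_iff] using this

lemma pv_bin_insert (l : List (String × String)) (kp : String × String)
    (hs : l.Pairwise (fun a b => a.1 < b.1)) :
    PySem.List.insert l ((pvFindIdx l kp.1 0 l.length : Nat) : Int) kp = pvInsertB l kp := by
  obtain ⟨hr, hiff⟩ := pv_bisect_spec l kp.1 hs l.length 0 l.length (by omega) (by omega)
    (le_refl _) (fun i h hi' => absurd hi' (by omega)) (fun i h hge => absurd h (by omega))
  rw [PySem.List.insert_natCast l _ kp hr]
  exact pv_take_drop_insert kp l _ hr hiff

lemma pv_fold_bin_eq_lin (M : List (String × Int)) :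
    ∀ acc : List (String × String),
      acc.Pairwise (fun a b => a.1 < b.1) →
      ((acc ++ (M.filter (fun p => !decide (p.2 ≤ 0))).map pvG).map Prod.fst).Nodup →
      M.foldl pvBody acc = M.foldl pvBodyL acc := by
  induction M with
  | nil => intro acc _ _; rfl
  | cons h t ih =>
    intro acc hs hnd
    simp only [List.foldl_cons, List.filter_cons, pvBody, pvBodyL] at *
    by_cases hp : h.2 ≤ 0
    · simp only [hp, if_pos, decide_true, Bool.not_true, Bool.false_eq_true, if_neg,
        not_false_iff] at hnd ⊢
      exact ih acc hs hnd
    · simp only [hp, if_neg, not_false_iff, decide_false, Bool.not_false, if_pos,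
        List.map_cons] at hnd ⊢
      rw [pv_bin_insert acc (pvG h) hs]
      have hnd' : ((acc.map Prod.fst) ++ (pvG h).1 ::
          ((t.filter (fun p => !decide (p.2 ≤ 0))).map pvG).map Prod.fst).Nodup := by
        simpa using hnd
      have hdisj := (List.nodup_append.mp hnd').2.2
      have hne : ∀ x ∈ acc, x.1 ≠ (pvG h).1 := by
        intro x hx heq
        exact (hdisj _ (heq ▸ List.mem_map.mpr ⟨x, hx, rfl⟩) _ List.mem_cons_self) rfl
      apply ih (pvInsertB acc (pvG h)) (pv_ins_pairwise hs hne)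
      have hpermfst := (pv_ins_append_perm acc (pvG h)
        ((t.filter (fun p => !decide (p.2 ≤ 0))).map pvG)).map Prod.fst
      exact hpermfst.nodup_iff.mpr (by simpa using hnd)

lemma pv_filter_pos_eq (M : List (String × Int)) :
    M.filter (fun p => !decide (p.2 ≤ 0)) = M.filter (fun p => decide (0 < p.2)) := by
  apply List.filter_congr
  intro a _
  by_cases h : a.2 ≤ 0
  · simp [h, show ¬ (0 : Int) < a.2 by omega]
  · simp [h, show (0 : Int) < a.2 by omega]

-- B's port reduces to the same "None"-or-join normal form
lemma pv_B_eq (sc : List (String × Int)) :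
    build_stoich_label_py_alt sc =
      (let L := ((PySem.Dict.ofList sc).items).filter (fun p => decide (0 < p.2))
       if L = [] then "None"
       else PySem.Str.join ""
         ((PySem.List.sorted L (fun kv => pvKeyB kv.1)).map
           (fun kv => if kv.2 = 1 then kv.1 else kv.1 ++ PySem.Int.toStr kv.2))) := by
  have hbody : build_stoich_label_py_alt sc =
      (let ordered := ((PySem.Dict.ofList sc).items).foldl pvBody []
       if ordered = [] then "None" else PySem.Str.join "" (ordered.map Prod.snd)) := rfl
  rw [hbody]
  set M := (PySem.Dict.ofList sc).items with hM
  set L := M.filter (fun p => decide (0 < p.2)) with hLdef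
  have hnd : (L.map Prod.fst).Nodup := by
    have h0 : (M.map Prod.fst).Nodup := PySem.Dict.nodup_keys_ofList sc
    exact (List.Sublist.map Prod.fst (List.filter_sublist)).nodup h0
  have hndk : ((L.map pvG).map Prod.fst).Nodup := by
    have : (L.map pvG).map Prod.fst = (L.map Prod.fst).map pvKeyB := by
      simp only [List.map_map]
      exact List.map_congr_left (fun p _ => rfl)
    rw [this]
    exact hnd.map pv_keyB_inj
  have hlin : M.foldl pvBody [] = M.foldl pvBodyL [] := by
    apply pv_fold_bin_eq_lin M [] (by simp)
    rw [pv_filter_pos_eq, ← hLdef]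
    simpa using hndk
  rw [hlin]
  -- the fold result equals the sorted-by-key formatted list
  have hperm : (M.foldl pvBodyL []).Perm (L.map pvG) := by
    have := pv_fold_perm M []
    rw [pv_filter_pos_eq, ← hLdef] at this
    simpa using this
  have hfold_pw : (M.foldl pvBodyL []).Pairwise (fun a b => a.1 < b.1) := by
    apply pv_fold_pairwise M [] (by simp)
    rw [pv_filter_pos_eq, ← hLdef]
    simpa using hndk
  set T := (PySem.List.sorted L (fun kv => pvKeyB kv.1)).map pvG with hT
  have hTperm : T.Perm (L.map pvG) :=
    (PySem.List.sorted_perm L (fun kv => pvKeyB kv.1) false).map pvG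
  have hT_pw : T.Pairwise (fun a b => a.1 < b.1) := by
    rw [hT, List.pairwise_map]
    have hle := PySem.List.sorted_pairwise L (fun kv => pvKeyB kv.1)
    have hnds : ((PySem.List.sorted L (fun kv => pvKeyB kv.1)).map Prod.fst).Nodup := by
      rw [List.Perm.nodup_iff ((PySem.List.sorted_perm L (fun kv => pvKeyB kv.1) false).map Prod.fst)]
      exact hnd
    rw [List.nodup_iff_pairwise_ne, List.pairwise_map] at hnds
    exact (hle.and hnds).imp (fun h =>
      lt_of_le_of_ne h.1 (fun heq => h.2 (pv_keyB_inj heq)))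
  have heq : M.foldl pvBodyL [] = T :=
    List.Perm.eq_of_pairwise
      (fun _ _ _ _ h1 h2 => absurd (lt_trans h1 h2) (lt_irrefl _))
      hfold_pw hT_pw (hperm.trans hTperm.symm)
  rw [heq]
  have hTnil : (T = []) ↔ (L = []) := by
    constructor
    · intro h
      have : L.map pvG = [] := (hTperm.symm.trans (by rw [h])).eq_nil
      exact List.map_eq_nil_iff.mp this
    · intro h
      rw [hT, h]
      have : PySem.List.sorted ([] : List (String × Int)) (fun kv => pvKeyB kv.1) = [] :=
        (PySem.List.sorted_perm ([] : List (String × Int)) _ false).eq_nil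
      rw [this]; rfl
  by_cases hL : L = []
  · rw [if_pos (hTnil.mpr hL), if_pos hL]
  · rw [if_neg (fun h => hL (hTnil.mp h)), if_neg hL]
    rw [hT, List.map_map]
    rfl

lemma pv_main (sc : List (String × Int)) :
    build_stoich_label_py sc = build_stoich_label_py_alt sc := by
  rw [pv_A_eq, pv_B_eq]

-- ===== VERDICT (by name: the statement is the Claim_ definition above) =====
theorem build_stoich_label_py_spec : Claim_equal_build_stoich_label_py := by
  intro sc _
  unfold Spec_build_stoich_label_py
  exact pv_main sc
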